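-- pv_equiv track=rewrite | github.com/earlwerner1210-bit/control-fabric-platform | app/domain_packs/reconciliation.py | _build_contract_data
-- ===== SOURCE A (Python) =====
-- from typing import Any
--
-- def _safe_str(value: Any) -> str:
--     """Coerce *value* to a stripped string."""
--     if value is None:
--         return ""
--     return str(value).strip()
--
-- def _build_contract_data(contract_objects: list[dict]) -> dict:
--     """Reshape flat contract objects into the dict format expected by sub-reconcilers."""
--     rate_card: list[dict] = []
--     obligations: list[dict] = []
--     scope_boundaries: list[dict] = []
--     invoices: list[dict] = []
--
--     for obj in contract_objects:
--         obj_type = _safe_str(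
--             obj.get("type", obj.get("control_type", obj.get("object_type", "")))
--         )
--         if obj_type in ("rate_card", "rate", "billable_event"):
--             rate_card.append(obj)
--         elif obj_type in ("obligation", "sla"):
--             obligations.append(obj)
--         elif obj_type in ("scope", "scope_boundary"):
--             scope_boundaries.append(obj)
--         elif obj_type == "invoice":
--             invoices.append(obj)
--
--     return {
--         "rate_card": rate_card,
--         "obligations": obligations,
--         "scope_boundaries": scope_boundaries,
--         "invoices": invoices,
--     }
-- ===== SOURCE B (Python) =====
-- from typing import Any
--
-- def _safe_str(value: Any) -> str:
--     if value is None: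
--         return ""
--     return str(value).strip()
--
-- def _obj_type(obj: dict) -> str:
--     return _safe_str(obj.get("type", obj.get("control_type", obj.get("object_type", ""))))
--
-- def _build_contract_data(contract_objects: list[dict]) -> dict:
--     return {
--         "rate_card": [o for o in contract_objects if _obj_type(o) in ("rate_card", "rate", "billable_event")],
--         "obligations": [o for o in contract_objects if _obj_type(o) in ("obligation", "sla")],
--         "scope_boundaries": [o for o in contract_objects if _obj_type(o) in ("scope", "scope_boundary")],
--         "invoices": [o for o in contract_objects if _obj_type(o) == "invoice"],
--     }
-- ===== Notes on version B (the rewrite author's own statement) =====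
-- stated objective: idiomatic
-- what changed: Replaces the single accumulator loop with an if/elif branch ladder by a dict literal of four independent filter comprehensions, one per bucket.
import Mathlib
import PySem

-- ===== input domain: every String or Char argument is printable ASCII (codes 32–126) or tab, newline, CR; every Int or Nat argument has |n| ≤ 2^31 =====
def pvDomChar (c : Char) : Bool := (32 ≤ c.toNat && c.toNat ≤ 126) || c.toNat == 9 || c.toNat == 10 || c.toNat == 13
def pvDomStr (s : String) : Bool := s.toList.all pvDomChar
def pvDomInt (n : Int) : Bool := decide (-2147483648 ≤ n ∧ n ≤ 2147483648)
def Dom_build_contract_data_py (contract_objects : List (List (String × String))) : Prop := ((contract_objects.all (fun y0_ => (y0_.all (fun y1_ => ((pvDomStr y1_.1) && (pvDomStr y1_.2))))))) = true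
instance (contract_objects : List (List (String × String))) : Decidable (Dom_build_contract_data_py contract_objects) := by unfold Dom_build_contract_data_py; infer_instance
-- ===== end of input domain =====

-- B replaces A's single accumulator loop (if/elif ladder, four mutable lists) by four
-- independent filter comprehensions, one per bucket (idiomatic; same O(n) cost).

-- Shared helper: obj_type = _safe_str(obj.get("type", obj.get("control_type", obj.get("object_type", ""))));
-- the looked-up value is always a string here, so _safe_str is exactly str.strip (exact on this domain).
def contractObjType (obj : List (String × String)) : String :=
  PySem.Str.strip (PySem.Dict.getD (PySem.Dict.mk obj) "type"
    (PySem.Dict.getD (PySem.Dict.mk obj) "control_type"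
      (PySem.Dict.getD (PySem.Dict.mk obj) "object_type" "")))

-- ===== PORT A =====
-- one loop step of A: the if/elif ladder appending obj to one of the four accumulators
def stepA (st : List (List (String × String)) × List (List (String × String)) × List (List (String × String)) × List (List (String × String)))
    (obj : List (String × String)) :
    List (List (String × String)) × List (List (String × String)) × List (List (String × String)) × List (List (String × String)) :=
  let (rc, ob, sb, inv) := st
  let t := contractObjType obj
  if t = "rate_card" ∨ t = "rate" ∨ t = "billable_event" then (rc ++ [obj], ob, sb, inv)
  else if t = "obligation" ∨ t = "sla" then (rc, ob ++ [obj], sb, inv)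
  else if t = "scope" ∨ t = "scope_boundary" then (rc, ob, sb ++ [obj], inv)
  else if t = "invoice" then (rc, ob, sb, inv ++ [obj])
  else (rc, ob, sb, inv)

def build_contract_data_py (contract_objects : List (List (String × String))) : List (String × List (List (String × String))) :=
  let st := contract_objects.foldl stepA ([], [], [], [])
  [("rate_card", st.1), ("obligations", st.2.1), ("scope_boundaries", st.2.2.1), ("invoices", st.2.2.2)]

-- ===== PORT B =====
def build_contract_data_py_alt (contract_objects : List (List (String × String))) : List (String × List (List (String × String))) :=
  [("rate_card", contract_objects.filter (fun o => decide (contractObjType o = "rate_card" ∨ contractObjType o = "rate" ∨ contractObjType o = "billable_event"))),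
   ("obligations", contract_objects.filter (fun o => decide (contractObjType o = "obligation" ∨ contractObjType o = "sla"))),
   ("scope_boundaries", contract_objects.filter (fun o => decide (contractObjType o = "scope" ∨ contractObjType o = "scope_boundary"))),
   ("invoices", contract_objects.filter (fun o => decide (contractObjType o = "invoice")))]

-- ===== PRECONDITION & SPEC =====
def Spec_build_contract_data_py (contract_objects : List (List (String × String))) (out : List (String × List (List (String × String)))) : Prop := out = build_contract_data_py_alt contract_objects
instance (contract_objects : List (List (String × String))) (out : List (String × List (List (String × String)))) : Decidable (Spec_build_contract_data_py contract_objects out) := by unfold Spec_build_contract_data_py; infer_instance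

-- ===== CLAIM (what is proved, stated in full; the proofs are below) =====
def Claim_equal_build_contract_data_py : Prop := ∀ (contract_objects : List (List (String × String))), Dom_build_contract_data_py contract_objects → Spec_build_contract_data_py contract_objects (build_contract_data_py contract_objects)

-- ===== LEMMAS AND PROOFS =====

theorem foldl_stepA (l : List (List (String × String)))
    (rc ob sb inv : List (List (String × String))) :
    l.foldl stepA (rc, ob, sb, inv) =
      (rc ++ l.filter (fun o => decide (contractObjType o = "rate_card" ∨ contractObjType o = "rate" ∨ contractObjType o = "billable_event")),
       ob ++ l.filter (fun o => decide (contractObjType o = "obligation" ∨ contractObjType o = "sla")),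
       sb ++ l.filter (fun o => decide (contractObjType o = "scope" ∨ contractObjType o = "scope_boundary")),
       inv ++ l.filter (fun o => decide (contractObjType o = "invoice"))) := by
  induction l generalizing rc ob sb inv with
  | nil => simp
  | cons x xs ih =>
    simp only [List.foldl_cons, List.filter_cons, stepA]
    generalize contractObjType x = t
    by_cases h1 : t = "rate_card" ∨ t = "rate" ∨ t = "billable_event"
    · have h2 : ¬(t = "obligation" ∨ t = "sla") := by
        rcases h1 with h | h | h <;> subst h <;> decide
      have h3 : ¬(t = "scope" ∨ t = "scope_boundary") := by
        rcases h1 with h | h | h <;> subst h <;> decide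
      have h4 : ¬(t = "invoice") := by
        rcases h1 with h | h | h <;> subst h <;> decide
      simp [h1, h2, h3, h4, ih]
    · by_cases h2 : t = "obligation" ∨ t = "sla"
      · have h3 : ¬(t = "scope" ∨ t = "scope_boundary") := by
          rcases h2 with h | h <;> subst h <;> decide
        have h4 : ¬(t = "invoice") := by
          rcases h2 with h | h <;> subst h <;> decide
        simp [h1, h2, h3, h4, ih]
      · by_cases h3 : t = "scope" ∨ t = "scope_boundary"
        · have h4 : ¬(t = "invoice") := by
            rcases h3 with h | h <;> subst h <;> decide
          simp [h1, h2, h3, h4, ih]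
        · by_cases h4 : t = "invoice"
          · simp [h4, ih]
          · simp [h1, h2, h3, h4, ih]

-- ===== VERDICT (by name: the statement is the Claim_ definition above) =====
theorem build_contract_data_py_spec : Claim_equal_build_contract_data_py := by
  intro contract_objects _
  unfold Spec_build_contract_data_py build_contract_data_py build_contract_data_py_alt
  rw [foldl_stepA]
  simp
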